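-- pv_equiv track=rewrite | github.com/pc5401/my_BOJ | 백준/Gold/1484. 다이어트/다이어트.py | make_lst
-- ===== SOURCE A (Python) =====
-- def make_lst(n: int) -> list:
--     rtn = [1]
--     for i in range(2, 50001):
--         v = i**2
--         if v - rtn[-1] > n:
--             rtn.append(v)
--             break
--         rtn.append(v)
--     return rtn
-- ===== SOURCE B (Python) =====
-- def make_lst(n: int) -> list:
--     s = min(50000, max(2, (n + 1) // 2 + 1))
--     return [i * i for i in range(1, s + 1)]
-- ===== Notes on version B (the rewrite author's own statement) =====
-- stated objective: simpler
-- what changed: B solves the gap inequality in closed form to get the stopping index directly and builds the whole list in one comprehension, instead of A's loop that appends squares while comparing each consecutive gap and breaking.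
import Mathlib
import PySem

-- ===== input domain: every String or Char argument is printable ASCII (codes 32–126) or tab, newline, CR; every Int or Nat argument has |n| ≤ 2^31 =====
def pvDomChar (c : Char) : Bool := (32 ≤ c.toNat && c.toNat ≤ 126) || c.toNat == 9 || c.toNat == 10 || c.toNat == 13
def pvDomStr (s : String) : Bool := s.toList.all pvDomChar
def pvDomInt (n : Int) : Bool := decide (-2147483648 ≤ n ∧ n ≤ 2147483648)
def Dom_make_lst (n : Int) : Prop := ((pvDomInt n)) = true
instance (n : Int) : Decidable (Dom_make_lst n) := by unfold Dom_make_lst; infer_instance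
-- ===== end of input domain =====

-- B solves the gap inequality in closed form for the stopping index and builds the square
-- list in one comprehension, instead of A's append-and-compare loop with a break (objective: simpler).

-- ===== PORT A =====
-- A's for-loop with its break, as structural recursion over the same state; rtn[-1] is
-- ported with PySem.List.pyGet? (rtn is never empty, so the .getD 0 default is never used)
def make_lst_loop (n : Int) (rtn : List Int) (i : Nat) : List Int :=
  if 50000 < i then rtn
  else
    let v : Int := (i : Int) ^ 2
    if v - ((PySem.List.pyGet? rtn (-1)).getD 0) > n then rtn ++ [v]
    else make_lst_loop n (rtn ++ [v]) (i + 1)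
  termination_by 50001 - i

def make_lst (n : Int) : List Int := make_lst_loop n [1] 2

-- ===== PORT B =====
def make_lst_alt (n : Int) : List Int :=
  let s : Int := min 50000 (max 2 (PySem.Int.floordiv (n + 1) 2 + 1))
  (PySem.List.pyRange 1 (s + 1) 1).map (fun i => i * i)

-- ===== PRECONDITION & SPEC =====
def Spec_make_lst (n : Int) (out : List Int) : Prop := out = make_lst_alt n
instance (n : Int) (out : List Int) : Decidable (Spec_make_lst n out) := by unfold Spec_make_lst; infer_instance

-- ===== CLAIM (what is proved, stated in full; the proofs are below) =====
def Claim_equal_make_lst : Prop := ∀ (n : Int), Dom_make_lst n → Spec_make_lst n (make_lst n)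

-- ===== LEMMAS AND PROOFS =====

/-- the list [1², 2², …, m²] -/
def sqList (m : Nat) : List Int := (List.range m).map (fun j => (Int.ofNat (j + 1)) ^ 2)

lemma sqList_succ (m : Nat) : sqList (m + 1) = sqList m ++ [((m : Int) + 1) ^ 2] := by
  simp [sqList, List.range_succ, Int.ofNat_eq_natCast]

lemma sqList_last (m : Nat) (hm : 1 ≤ m) :
    (PySem.List.pyGet? (sqList m) (-1)).getD 0 = (m : Int) ^ 2 := by
  obtain ⟨k, rfl⟩ : ∃ k, m = k + 1 := ⟨m - 1, by omega⟩
  rw [sqList_succ, PySem.List.pyGet?]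
  simp [sqList, PySem.List.pyIdx?]

lemma map_sq (m : Nat) : (PySem.List.pyRange 1 ((m : Int) + 1) 1).map (fun i => i * i) = sqList m := by
  rw [PySem.List.pyRange_one]
  have h : ((m : Int) + 1 - 1).toNat = m := by omega
  rw [h, sqList, List.map_map]
  apply List.map_congr_left
  intro a _
  simp [Function.comp, Int.ofNat_eq_natCast]
  ring

set_option maxRecDepth 4096 in
lemma loop_eq (n : Int) : ∀ k i, i = 50001 - k → 2 ≤ i → i ≤ 50000 →
    make_lst_loop n (sqList (i - 1)) i
      = sqList (max i (min 50000 (PySem.Int.floordiv (n + 1) 2 + 1)).toNat) := by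
  intro k
  induction k with
  | zero => intro i h1 h2 h3; omega
  | succ k ih =>
    intro i h1 h2 h3
    have hfd : PySem.Int.floordiv (n + 1) 2 = (n + 1) / 2 :=
      PySem.Int.floordiv_eq_ediv_of_pos (by omega)
    rw [make_lst_loop]
    have hlast := sqList_last (i - 1) (by omega)
    rw [if_neg (by omega), hlast]
    have hc : ((i - 1 : Nat) : Int) = (i : Int) - 1 := by omega
    have hgap : (i : Int) ^ 2 - ((i - 1 : Nat) : Int) ^ 2 = 2 * i - 1 := by
      rw [hc]; ring
    by_cases hbr : (i : Int) ^ 2 - ((i - 1 : Nat) : Int) ^ 2 > n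
    · rw [if_pos hbr]
      rw [hgap] at hbr
      -- break: result is sqList i, and the closed-form stopping index is i
      have hmax : max i (min 50000 (PySem.Int.floordiv (n + 1) 2 + 1)).toNat = i := by
        rw [hfd]; omega
      rw [hmax]
      have : sqList i = sqList (i - 1) ++ [(i : Int) ^ 2] := by
        obtain ⟨j, rfl⟩ : ∃ j, i = j + 1 := ⟨i - 1, by omega⟩
        rw [sqList_succ]; push_cast; simp
      rw [this]
    · rw [if_neg hbr]
      rw [hgap] at hbr
      have hsq : sqList (i - 1) ++ [(i : Int) ^ 2] = sqList ((i + 1) - 1) := by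
        obtain ⟨j, rfl⟩ : ∃ j, i = j + 1 := ⟨i - 1, by omega⟩
        rw [show j + 1 + 1 - 1 = j + 1 by omega, sqList_succ]; push_cast; simp
      rw [hsq]
      by_cases h50 : i = 50000
      · rw [make_lst_loop]
        rw [if_pos (show 50000 < i + 1 by omega)]
        congr 1
        rw [hfd]; omega
      · have := ih (i + 1) (by omega) (by omega) (by omega)
        rw [this]
        congr 1
        rw [hfd] at *
        omega

lemma alt_eq_sqList (n : Int) :
    make_lst_alt n = sqList (min 50000 (max 2 (PySem.Int.floordiv (n + 1) 2 + 1))).toNat := by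
  have hfd : PySem.Int.floordiv (n + 1) 2 = (n + 1) / 2 :=
    PySem.Int.floordiv_eq_ediv_of_pos (by omega)
  show (PySem.List.pyRange 1 (min 50000 (max 2 (PySem.Int.floordiv (n + 1) 2 + 1)) + 1) 1).map
      (fun i => i * i) = _
  rw [show min 50000 (max 2 (PySem.Int.floordiv (n + 1) 2 + 1)) + 1
        = ((min 50000 (max 2 (PySem.Int.floordiv (n + 1) 2 + 1))).toNat : Int) + 1 by
      rw [hfd]; omega]
  exact map_sq _

-- ===== VERDICT (by name: the statement is the Claim_ definition above) =====
theorem make_lst_spec : Claim_equal_make_lst := by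
  intro n _
  unfold Spec_make_lst make_lst
  have h1 : ([1] : List Int) = sqList (2 - 1) := by decide
  rw [h1, loop_eq n 49999 2 (by omega) (by omega) (by omega), alt_eq_sqList]
  congr 1
  have hfd : PySem.Int.floordiv (n + 1) 2 = (n + 1) / 2 :=
    PySem.Int.floordiv_eq_ediv_of_pos (by omega)
  rw [hfd]
  omega
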